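-- pv_equiv track=rewrite | github.com/AdamZhouSE/pythonHomework | Code/CodeRecords/2535/59308/251618.py | solve
-- ===== SOURCE A (Python) =====
-- def solve(nums)->int:
--     tar = nums.index(max(nums))
--     if tar > 0:
--         left = nums[:tar]
--         right = nums[tar:]
--         if max(left) < min(right):
--             return solve(left) + solve(right)
--         else:
--             return 1
--     else:
--         return 1
-- ===== SOURCE B (Python) =====
-- def solve(nums) -> int:
--     # One linear pass builds fm[k] = first index of the maximum of nums[:k];
--     # then peel blocks off the right, re-using fm and disjoint segment minima (O(n) total).
--     n = len(nums)
--     fm = [0] * (n + 1)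
--     for k in range(2, n + 1):
--         p = fm[k - 1]
--         fm[k] = p if nums[k - 1] <= nums[p] else k - 1
--     count = 1
--     k = n
--     while True:
--         t = fm[k]
--         if t > 0 and nums[fm[t]] < min(nums[t:k]):
--             count += 1
--             k = t
--         else:
--             return count
-- ===== Notes on version B (the rewrite author's own statement) =====
-- stated objective: faster
-- what changed: Replaces the recursive peel (each level rescanning the prefix with max/index/min, O(n^2) worst case) by one left pass building a first-argmax-per-prefix table, then an iterative right-to-left peel whose segment minima cover disjoint slices, O(n) total.
import Mathlib
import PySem

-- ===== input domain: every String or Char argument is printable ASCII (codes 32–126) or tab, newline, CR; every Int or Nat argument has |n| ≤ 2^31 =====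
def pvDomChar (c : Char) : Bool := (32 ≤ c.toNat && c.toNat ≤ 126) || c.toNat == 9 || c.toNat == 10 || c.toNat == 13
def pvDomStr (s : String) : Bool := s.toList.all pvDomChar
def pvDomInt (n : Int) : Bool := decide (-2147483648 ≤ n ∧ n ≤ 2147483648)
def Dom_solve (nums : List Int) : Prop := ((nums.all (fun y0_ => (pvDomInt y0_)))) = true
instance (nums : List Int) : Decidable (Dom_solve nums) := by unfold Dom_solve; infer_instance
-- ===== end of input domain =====

-- B replaces A's recursive peel (each level rescanning the current prefix with max/index/min)
-- by one left pass building a first-argmax-per-prefix table and an iterative peel over it.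

-- ===== PORT A =====
-- Literal port of A: tar = nums.index(max(nums)); if tar > 0 split at tar,
-- recurse on both halves when max(left) < min(right), else 1.
def solve (nums : List Int) : Int :=
  match hm : PySem.List.max? nums (fun x => x) with
  | none => 0   -- Python: max([]) raises ValueError (outside Pre_solve)
  | some m =>
    match ht : PySem.List.index? nums m with
    | none => 0 -- unreachable: m ∈ nums
    | some tar =>
      if htar : (tar : Int) > 0 then
        match PySem.List.max? (PySem.List.slice nums none (some (tar : Int))) (fun x => x),
              PySem.List.min? (PySem.List.slice nums (some (tar : Int)) none) (fun x => x) with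
        | some ml, some mr =>
          if ml < mr then
            solve (PySem.List.slice nums none (some (tar : Int)))
              + solve (PySem.List.slice nums (some (tar : Int)) none)
          else 1
        | _, _ => 0 -- unreachable: both slices nonempty when 0 < tar < len
      else 1
termination_by nums.length
decreasing_by
  · obtain ⟨hk, -, -⟩ := PySem.List.getElem_of_index?_eq_some ht
    simp [PySem.List.slice_to_natCast]
    omega
  · obtain ⟨hk, -, -⟩ := PySem.List.getElem_of_index?_eq_some ht
    simp [PySem.List.slice_from_natCast]
    omega

-- ===== PORT B =====
-- fm[k] = first index of the maximum of nums[:k]; built by the loop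
-- 'for k in range(2, n+1): fm[k] = fm[k-1] if nums[k-1] <= nums[fm[k-1]] else k-1'.
def fmBuild (nums : List Int) : List Nat :=
  (PySem.List.pyRange 2 ((nums.length : Int) + 1) 1).foldl
    (fun fm k =>
      let p := PySem.List.pyGetD fm (k - 1) 0
      PySem.List.pySetD fm k
        (if PySem.List.pyGetD nums (k - 1) 0 ≤ PySem.List.pyGetD nums ((p : Int)) 0
         then p else (k - 1).toNat))
    (List.replicate (nums.length + 1) 0)

-- the 'while True' peel: t = fm[k]; if t > 0 and nums[fm[t]] < min(nums[t:k]): count += 1; k = t.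
-- 'fuel' (initially k) and the 't < k' test are totality guards only: fm[k] < k always
-- holds for the table fmBuild builds, so the loop makes fewer than k iterations.
def peel (nums : List Int) (fm : List Nat) : Nat → Nat → Int → Int
  | 0, _, count => count
  | fuel + 1, k, count =>
    let t := fm.getD k 0
    if 0 < t then
      match PySem.List.min? (PySem.List.slice nums (some (t : Int)) (some (k : Int))) (fun x => x) with
      | some mr =>
        if PySem.List.pyGetD nums ((fm.getD t 0 : Nat) : Int) 0 < mr then
          if t < k then peel nums fm fuel t (count + 1) else count
        else count
      | none => count -- unreachable: t < k, so nums[t:k] is nonempty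
    else count

def solve_alt (nums : List Int) : Int :=
  peel nums (fmBuild nums) nums.length nums.length 1

-- ===== PRECONDITION & SPEC =====
-- Pre_solve excludes only the empty list, on which A raises ValueError (max of empty sequence).
def Pre_solve (nums : List Int) : Prop := nums ≠ []
instance (nums : List Int) : Decidable (Pre_solve nums) := by unfold Pre_solve; infer_instance
def pvWitness_solve : List Int := [1, 3, 2, 5]

def Spec_solve (nums : List Int) (out : Int) : Prop := out = solve_alt nums
instance (nums : List Int) (out : Int) : Decidable (Spec_solve nums out) := by unfold Spec_solve; infer_instance

-- ===== CLAIM (what is proved, stated in full; the proofs are below) =====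
def Claim_equal_solve : Prop := ∀ (nums : List Int), Dom_solve nums → Pre_solve nums → Spec_solve nums (solve nums)

-- ===== LEMMAS AND PROOFS =====

-- Reference recurrence: F nums k = first index of the maximum of nums[:k] (F nums 0 = 0).
def F (nums : List Int) : Nat → Nat
  | 0 => 0
  | k + 1 =>
    let p := F nums k
    if nums.getD k 0 ≤ nums.getD p 0 then p else k

theorem F_spec (nums : List Int) (k : Nat) :
    F nums (k + 1) ≤ k ∧ (∀ j ≤ k, nums.getD j 0 ≤ nums.getD (F nums (k + 1)) 0) ∧
      (∀ j < F nums (k + 1), nums.getD j 0 < nums.getD (F nums (k + 1)) 0) := by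
  induction k with
  | zero =>
    refine ⟨by simp [F], fun j hj => by simp_all [F], fun j hj => by simp [F] at hj⟩
  | succ k ih =>
    obtain ⟨ih1, ih2, ih3⟩ := ih
    have hF : F nums (k+1+1) = if nums.getD (k+1) 0 ≤ nums.getD (F nums (k+1)) 0 then F nums (k+1) else k+1 := rfl
    rw [hF]
    split_ifs with h
    · refine ⟨by omega, fun j hj => ?_, ih3⟩
      rcases Nat.lt_or_ge j (k+1) with hj' | hj'
      · exact ih2 j (by omega)
      · have : j = k + 1 := by omega
        subst this; exact h
    · rw [not_le] at h
      refine ⟨le_rfl, fun j hj => ?_, fun j hj => ?_⟩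
      · rcases Nat.lt_or_ge j (k+1) with hj' | hj'
        · exact le_of_lt (lt_of_le_of_lt (ih2 j (by omega)) h)
        · have : j = k + 1 := by omega
          subst this; exact le_rfl
      · exact lt_of_le_of_lt (ih2 j (by omega)) h

theorem fmBuild_inter (nums : List Int) (j : Nat) (h2 : 2 ≤ j) (hj : j ≤ nums.length + 1) :
    (PySem.List.pyRange 2 (j : Int) 1).foldl
      (fun (fm : List Nat) (k : Int) =>
        let p := PySem.List.pyGetD fm (k - 1) 0
        PySem.List.pySetD fm k
          (if PySem.List.pyGetD nums (k - 1) 0 ≤ PySem.List.pyGetD nums ((p : Int)) 0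
           then p else (k - 1).toNat))
      (List.replicate (nums.length + 1) (0 : Nat))
    = (List.range (nums.length + 1)).map (fun i => if i < j then F nums i else 0) := by
  induction j with
  | zero => omega
  | succ j ih =>
    rcases Nat.lt_or_ge j 2 with hj2 | hj2
    · -- j + 1 = 2 : the range is empty
      have : j = 1 := by omega
      subst this
      rw [show ((2:Nat) : Int) = 2 by norm_num, PySem.List.pyRange_one_eq_nil (by norm_num)]
      simp only [List.foldl_nil]
      apply List.ext_getElem (by simp)
      intro i h1 h2'
      simp only [List.getElem_replicate, List.getElem_map, List.getElem_range]
      split_ifs with hi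
      · interval_cases i <;> simp [F]
      · rfl
    · have hcast : ((j + 1 : Nat) : Int) = (j : Int) + 1 := by push_cast; ring
      rw [hcast, PySem.List.pyRange_one_succ_right (by exact_mod_cast hj2 : (2:Int) ≤ (j:Int)),
          List.foldl_append, ih hj2 (by omega)]
      simp only [List.foldl_cons, List.foldl_nil]
      have hgd : PySem.List.pyGetD ((List.range (nums.length + 1)).map (fun i => if i < j then F nums i else 0)) ((j:Int) - 1) 0 = F nums (j - 1) := by
        rw [show ((j:Int) - 1) = ((j - 1 : Nat) : Int) by omega, PySem.List.pyGetD_natCast,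
            List.getD_eq_getElem?_getD, List.getElem?_map]
        rw [List.getElem?_range (by omega : j - 1 < nums.length + 1)]
        simp only [Option.map_some, Option.getD_some]
        rw [if_pos (by omega)]
      rw [hgd]
      have hgn : PySem.List.pyGetD nums ((j:Int) - 1) 0 = nums.getD (j - 1) 0 := by
        rw [show ((j:Int) - 1) = ((j - 1 : Nat) : Int) by omega, PySem.List.pyGetD_natCast]
      rw [hgn, PySem.List.pyGetD_natCast, PySem.List.pySetD_natCast]
      have hv : (if nums.getD (j - 1) 0 ≤ nums.getD (F nums (j - 1)) 0 then F nums (j - 1)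
                 else ((j:Int) - 1).toNat) = F nums j := by
        have hj1 : j = (j - 1) + 1 := by omega
        have hFj : F nums j = if nums.getD (j - 1) 0 ≤ nums.getD (F nums (j - 1)) 0 then F nums (j - 1) else j - 1 := by
          conv_lhs => rw [hj1]
          rfl
        rw [show ((j:Int) - 1).toNat = j - 1 by omega, hFj]
      rw [hv]
      apply List.ext_getElem (by simp)
      intro i h1 h2'
      simp only [List.length_map, List.length_range] at h1 h2'
      simp only [List.getElem_set, List.getElem_map, List.getElem_range]
      rcases eq_or_ne j i with h | h
      · subst h; rw [if_pos rfl, if_pos (by omega)]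
      · rw [if_neg h]; split_ifs <;> first | rfl | omega
theorem fmBuild_getD (nums : List Int) (k : Nat) (hk : k ≤ nums.length) :
    (fmBuild nums).getD k 0 = F nums k := by
  rcases Nat.eq_zero_or_pos nums.length with h0 | h1
  · have hk0 : k = 0 := by omega
    subst hk0
    unfold fmBuild
    rw [h0, show ((0:Nat):Int) + 1 = 1 by norm_num, PySem.List.pyRange_one_eq_nil (by norm_num)]
    simp [F]
  · have h := fmBuild_inter nums (nums.length + 1) (by omega) le_rfl
    have hfm : fmBuild nums = (List.range (nums.length + 1)).map (fun i => if i < nums.length + 1 then F nums i else 0) := by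
      unfold fmBuild
      rw [show ((nums.length : Int) + 1) = ((nums.length + 1 : Nat) : Int) by push_cast; ring]
      exact h
    rw [hfm, List.getD_eq_getElem?_getD, List.getElem?_map, List.getElem?_range (by omega)]
    simp only [Option.map_some, Option.getD_some]
    rw [if_pos (by omega)]
theorem maxIdx_take (nums : List Int) (k : Nat) (h1 : 1 ≤ k) (hk : k ≤ nums.length) :
    PySem.List.max? (nums.take k) (fun x => x) = some (nums.getD (F nums k) 0) ∧
    PySem.List.index? (nums.take k) (nums.getD (F nums k) 0) = some (F nums k) := by
  obtain ⟨m', rfl⟩ : ∃ m', k = m' + 1 := ⟨k - 1, by omega⟩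
  obtain ⟨hFle, hle, hlt⟩ := F_spec nums m'
  set k := m' + 1 with hkdef
  set t := F nums k with htdef
  have htk : t < k := by omega
  have hlen : (nums.take k).length = k := by simp; omega
  have helem : ∀ j (hj : j < k), (nums.take k)[j]'(by omega) = nums.getD j 0 := by
    intro j hj
    rw [List.getElem_take]
    exact (List.getD_eq_getElem _ _ (by omega)).symm
  have htmem : nums.getD t 0 ∈ nums.take k := by
    rw [← helem t htk]
    exact List.getElem_mem _
  cases hmax : PySem.List.max? (nums.take k) (fun x => x) with
  | none =>
    rw [PySem.List.max?_eq_none_iff] at hmax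
    rw [hmax] at hlen
    simp at hlen
  | some m =>
    have hm_mem := PySem.List.max?_mem hmax
    have hm_max := PySem.List.max?_isMax hmax
    have hm_le : m ≤ nums.getD t 0 := by
      obtain ⟨j, hj, hje⟩ := List.mem_iff_getElem.mp hm_mem
      rw [hlen] at hj
      rw [helem j hj] at hje
      rw [← hje]; exact hle j (by omega)
    have hm_eq : m = nums.getD t 0 := le_antisymm hm_le (hm_max _ htmem)
    subst hm_eq
    refine ⟨rfl, ?_⟩
    rw [PySem.List.index?_eq_some_iff]
    refine ⟨(nums.take k).take t, (nums.take k).drop (t + 1), ?_, by simp; omega, ?_⟩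
    · conv_lhs => rw [← List.take_append_drop t (nums.take k)]
      rw [List.drop_eq_getElem_cons (by omega), helem t htk]
    · intro hmem
      obtain ⟨j, hj, hje⟩ := List.mem_iff_getElem.mp hmem
      simp only [List.length_take] at hj
      have hjt : j < t := by omega
      rw [List.getElem_take, helem j (by omega)] at hje
      have := hlt j hjt
      omega

theorem solve_cons_max (a : Int) (rest : List Int)
    (hmax : PySem.List.max? (a :: rest) (fun x => x) = some a) : solve (a :: rest) = 1 := by
  have h0 : PySem.List.index? (a :: rest) a = some 0 := PySem.List.index?_cons_self a rest
  rw [solve]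
  split
  · rename_i heq; rw [hmax] at heq; cases heq
  · rename_i m heq
    rw [hmax] at heq
    injection heq with heq'
    subst heq'
    split
    · rename_i heq2
      rw [h0] at heq2; cases heq2
    · rename_i tar heq2
      rw [h0] at heq2
      injection heq2 with heq2'
      subst heq2'
      norm_num
theorem solve_take_base (nums : List Int) (k : Nat) (h1 : 1 ≤ k) (hk : k ≤ nums.length)
    (ht0 : F nums k = 0) : solve (nums.take k) = 1 := by
  obtain ⟨hmax, -⟩ := maxIdx_take nums k h1 hk
  rw [ht0] at hmax
  cases nums with
  | nil => simp at hk; omega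
  | cons x xs =>
    obtain ⟨m', rfl⟩ : ∃ m', k = m' + 1 := ⟨k - 1, by omega⟩
    rw [List.take_succ_cons] at hmax ⊢
    exact solve_cons_max x (xs.take m') (by simpa using hmax)

theorem solve_drop_one (nums : List Int) (t k : Nat) (htk : t < k) (hk : k ≤ nums.length)
    (hbound : ∀ j, j < k → nums.getD j 0 ≤ nums.getD t 0) :
    solve ((nums.drop t).take (k - t)) = 1 := by
  set r := (nums.drop t).take (k - t) with hrdef
  have hrlen : r.length = k - t := by simp [hrdef]; omega
  have hrelem : ∀ j, j < k - t → r[j]? = some (nums.getD (t + j) 0) := by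
    intro j hj
    rw [hrdef, List.getElem?_take_of_lt hj, List.getElem?_drop,
        List.getElem?_eq_getElem (by omega), List.getD_eq_getElem _ _ (by omega)]
  cases hr : r with
  | nil => rw [hr] at hrlen; simp at hrlen; omega
  | cons a rest =>
    have ha : a = nums.getD t 0 := by
      have h := hrelem 0 (by omega)
      rw [hr] at h
      simp at h
      simpa using h
    apply solve_cons_max
    rw [← hr]
    cases hmax : PySem.List.max? r (fun x => x) with
    | none =>
      rw [PySem.List.max?_eq_none_iff, hr] at hmax; cases hmax
    | some mm =>
      have hmm_mem := PySem.List.max?_mem hmax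
      have hmm_max := PySem.List.max?_isMax hmax
      have h1 : mm ≤ a := by
        obtain ⟨j, hj, hje⟩ := List.mem_iff_getElem.mp hmm_mem
        have hje' : r[j]? = some mm := by
          rw [List.getElem?_eq_getElem hj, hje]
        rw [hrlen] at hj
        rw [hrelem j hj] at hje'
        injection hje' with hje''
        rw [ha, ← hje'']
        exact hbound (t + j) (by omega)
      have h2 : a ≤ mm := hmm_max a (by rw [hr]; exact List.mem_cons_self)
      rw [le_antisymm h1 h2]

theorem solve_take_step (nums : List Int) (k : Nat) (h1 : 1 ≤ k) (hk : k ≤ nums.length)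
    (ht0 : 0 < F nums k) (htk : F nums k < k) (mr : Int)
    (hmin : PySem.List.min? ((nums.drop (F nums k)).take (k - F nums k)) (fun x => x) = some mr)
    (hbound : ∀ j, j < k → nums.getD j 0 ≤ nums.getD (F nums k) 0) :
    solve (nums.take k) =
      if nums.getD (F nums (F nums k)) 0 < mr then solve (nums.take (F nums k)) + 1 else 1 := by
  obtain ⟨hmax, hidx⟩ := maxIdx_take nums k h1 hk
  set t := F nums k with htdef
  have hleft : PySem.List.slice (nums.take k) none (some (t : Int)) = nums.take t := by
    rw [PySem.List.slice_to_natCast, List.take_take]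
    congr 1
    omega
  have hright : PySem.List.slice (nums.take k) (some (t : Int)) none = (nums.drop t).take (k - t) := by
    rw [PySem.List.slice_from_natCast, List.drop_take]
  have hmaxl := (maxIdx_take nums t (by omega) (by omega)).1
  have hrone := solve_drop_one nums t k htk hk hbound
  rw [solve]
  split
  · rename_i heq
    rw [hmax] at heq; cases heq
  · rename_i m heq
    rw [hmax] at heq
    injection heq with heq'
    subst heq'
    split
    · rename_i heq2
      rw [hidx] at heq2; cases heq2
    · rename_i tar heq2
      rw [hidx] at heq2
      injection heq2 with heq2'
      subst heq2'
      rw [dif_pos (by exact_mod_cast ht0 : ((t : Int) > 0))]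
      simp only [hleft, hright, hmaxl, hmin, hrone]
theorem main_ind (nums : List Int) (fuel : Nat) : ∀ (k : Nat), 1 ≤ k → k ≤ nums.length →
    k ≤ fuel → ∀ (c : Int), peel nums (fmBuild nums) fuel k c = solve (nums.take k) + (c - 1) := by
  induction fuel with
  | zero => intro k h1 _ hf; omega
  | succ fuel ih =>
    intro k h1 hk hf c
    have hfm : (fmBuild nums).getD k 0 = F nums k := fmBuild_getD nums k hk
    have htk : F nums k < k := by
      obtain ⟨m', rfl⟩ : ∃ m', k = m' + 1 := ⟨k - 1, by omega⟩
      have := (F_spec nums m').1; omega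
    have hbound : ∀ j, j < k → nums.getD j 0 ≤ nums.getD (F nums k) 0 := by
      obtain ⟨m', rfl⟩ : ∃ m', k = m' + 1 := ⟨k - 1, by omega⟩
      intro j hj
      exact (F_spec nums m').2.1 j (by omega)
    by_cases ht0 : 0 < F nums k
    · -- split case possible
      set t := F nums k with htdef
      have hslice : PySem.List.slice nums (some (t : Int)) (some (k : Int)) =
          (nums.drop t).take (k - t) := by
        rw [PySem.List.slice_natCast]
      have hne : (nums.drop t).take (k - t) ≠ [] := by
        intro hcon
        have : ((nums.drop t).take (k - t)).length = 0 := by rw [hcon]; rfl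
        simp at this
        omega
      cases hmin : PySem.List.min? ((nums.drop t).take (k - t)) (fun x => x) with
      | none => rw [PySem.List.min?_eq_none_iff] at hmin; exact absurd hmin hne
      | some mr =>
        have hfmt : (fmBuild nums).getD t 0 = F nums t := fmBuild_getD nums t (by omega)
        have hstep := solve_take_step nums k h1 hk ht0 htk mr hmin hbound
        show (let t' := (fmBuild nums).getD k 0;
          if 0 < t' then
            match PySem.List.min? (PySem.List.slice nums (some (t' : Int)) (some (k : Int))) (fun x => x) with
            | some mr' =>
              if PySem.List.pyGetD nums (((fmBuild nums).getD t' 0 : Nat) : Int) 0 < mr' then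
                if t' < k then peel nums (fmBuild nums) fuel t' (c + 1) else c
              else c
            | none => c
          else c) = solve (nums.take k) + (c - 1)
        simp only [hfm, ← htdef]
        rw [if_pos ht0, hslice, hmin]
        simp only [hfmt, PySem.List.pyGetD_natCast]
        rw [hstep]
        by_cases hcond : nums.getD (F nums t) 0 < mr
        · rw [if_pos hcond, if_pos htk, if_pos hcond,
              ih t (by omega) (by omega) (by omega) (c + 1)]
          ring
        · rw [if_neg hcond, if_neg hcond]
          ring
    · -- F nums k = 0 : both return the base value
      have ht0' : F nums k = 0 := by omega
      show (let t' := (fmBuild nums).getD k 0;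
        if 0 < t' then
          match PySem.List.min? (PySem.List.slice nums (some (t' : Int)) (some (k : Int))) (fun x => x) with
          | some mr' =>
            if PySem.List.pyGetD nums (((fmBuild nums).getD t' 0 : Nat) : Int) 0 < mr' then
              if t' < k then peel nums (fmBuild nums) fuel t' (c + 1) else c
            else c
          | none => c
        else c) = solve (nums.take k) + (c - 1)
      simp only [hfm, ht0']
      rw [if_neg (by omega), solve_take_base nums k h1 hk ht0']
      ring

-- ===== VERDICT (by name: the statement is the Claim_ definition above) =====
theorem solve_spec : Claim_equal_solve := by
  intro nums _ hpre
  have h1 : 1 ≤ nums.length := by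
    cases nums with
    | nil => exact absurd rfl hpre
    | cons a t => simp
  unfold Spec_solve solve_alt
  rw [main_ind nums nums.length nums.length h1 le_rfl le_rfl 1, List.take_length]
  ring
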